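-- pv_equiv track=rewrite | github.com/prince-mishra/testprograms | MiniatureDachshund.py | maxMikan
-- ===== SOURCE A (Python) =====
-- def maxMikan(mikan, weight):
--     maxweight = 5000
--     mikan = sorted(mikan)
--     count = 0
--     for item in mikan:
--         weight+=item
--         if weight<=maxweight:
--             count +=1
--         else:
--             break
--     return count
-- ===== SOURCE B (Python) =====
-- def maxMikan(mikan, weight):
--     # Selection-based: no sort; repeatedly extract the minimum of the
--     # remaining pool while it still fits under the 5000 limit.
--     rest = list(mikan)
--     count = 0
--     while rest:
--         m = min(rest)
--         if weight + m > 5000: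
--             break
--         weight += m
--         count += 1
--         rest.remove(m)
--     return count
-- ===== Notes on version B (the rewrite author's own statement) =====
-- stated objective: alternative
-- what changed: Removes the sorted() pass entirely: B runs a selection loop that repeatedly takes min() of the remaining pool, stops when adding it would exceed 5000, and removes the taken element, instead of sorting once and scanning the prefix.
import Mathlib
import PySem

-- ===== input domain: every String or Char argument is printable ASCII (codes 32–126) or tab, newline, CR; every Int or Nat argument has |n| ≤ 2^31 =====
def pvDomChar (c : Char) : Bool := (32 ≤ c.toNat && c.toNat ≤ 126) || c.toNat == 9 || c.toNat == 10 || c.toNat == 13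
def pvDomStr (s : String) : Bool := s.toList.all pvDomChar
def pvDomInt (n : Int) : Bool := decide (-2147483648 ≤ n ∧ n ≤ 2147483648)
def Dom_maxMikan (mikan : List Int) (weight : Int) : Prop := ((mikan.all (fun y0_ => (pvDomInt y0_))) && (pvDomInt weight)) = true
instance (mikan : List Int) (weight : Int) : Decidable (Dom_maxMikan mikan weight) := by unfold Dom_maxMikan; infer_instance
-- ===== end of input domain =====

-- B removes the sorted() pass: a selection loop repeatedly extracts min() of the
-- remaining pool (stopping at the first overshoot of 5000) instead of sorting once
-- and scanning the prefix; same return value, alternative algorithm.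


-- ===== PORT A =====
-- the for-loop over sorted(mikan) with its early break: state (weight, count)
def maxMikanLoop : List Int → Int → Int → Int
  | [], _, count => count
  | item :: rest, weight, count =>
    let weight' := weight + item
    if weight' ≤ 5000 then maxMikanLoop rest weight' (count + 1) else count

def maxMikan (mikan : List Int) (weight : Int) : Int :=
  maxMikanLoop (PySem.List.sorted mikan (fun x => x) false) weight 0

-- ===== PORT B =====
-- B's while-loop: take min(rest); break if it would overshoot; else add, count,
-- and rest.remove(m) (= erase of the first occurrence; min ∈ rest, so no ValueError)
def maxMikanAltLoop (rest : List Int) (weight count : Int) : Int :=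
  match h : PySem.List.min? rest (fun x => x) with
  | none => count
  | some m =>
    if weight + m > 5000 then count
    else maxMikanAltLoop (rest.erase m) (weight + m) (count + 1)
termination_by rest.length
decreasing_by
  exact by have := List.length_erase_add_one (PySem.List.min?_mem h); omega

def maxMikan_alt (mikan : List Int) (weight : Int) : Int :=
  maxMikanAltLoop mikan weight 0

-- ===== PRECONDITION & SPEC =====
def Spec_maxMikan (mikan : List Int) (weight : Int) (out : Int) : Prop := out = maxMikan_alt mikan weight
instance (mikan : List Int) (weight : Int) (out : Int) : Decidable (Spec_maxMikan mikan weight out) := by unfold Spec_maxMikan; infer_instance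

-- ===== CLAIM (what is proved, stated in full; the proofs are below) =====
def Claim_equal_maxMikan : Prop := ∀ (mikan : List Int) (weight : Int), Dom_maxMikan mikan weight → Spec_maxMikan mikan weight (maxMikan mikan weight)

-- ===== LEMMAS AND PROOFS =====

-- pulling the minimum to the front IS the sorted order:
-- sorted(xs) = m :: sorted(xs with first m erased)  whenever min(xs) = m
theorem sorted_eq_min_cons (xs : List Int) (m : Int)
    (h : PySem.List.min? xs (fun x => x) = some m) :
    PySem.List.sorted xs (fun x => x) false
      = m :: PySem.List.sorted (xs.erase m) (fun x => x) false := by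
  have hm : m ∈ xs := PySem.List.min?_mem h
  have hmin : ∀ y ∈ xs, m ≤ y := by
    intro y hy; exact PySem.List.min?_isMin h y hy
  apply PySem.List.sorted_id_eq_of_perm_of_pairwise
  · exact ((PySem.List.sorted_perm _ _ _).cons m).trans
      (List.perm_cons_erase hm).symm
  · constructor
    · intro y hy
      exact hmin y (List.mem_of_mem_erase
        ((PySem.List.mem_sorted (xs.erase m) (fun x => x) false y).1 hy))
    · exact PySem.List.sorted_pairwise (xs.erase m) (fun x => x)

-- B's selection loop computes A's scan of the sorted list
theorem altLoop_eq (n : Nat) : ∀ (xs : List Int), xs.length = n → ∀ (w c : Int),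
    maxMikanAltLoop xs w c
      = maxMikanLoop (PySem.List.sorted xs (fun x => x) false) w c := by
  induction n using Nat.strong_induction_on with
  | _ n ih =>
    intro xs hn w c
    rw [maxMikanAltLoop]
    cases hmin : PySem.List.min? xs (fun x => x) with
    | none =>
      have hnil : xs = [] := (PySem.List.min?_eq_none_iff xs (fun x => x)).1 hmin
      subst hnil
      simp [maxMikanLoop, PySem.List.sorted]
    | some m =>
      rw [sorted_eq_min_cons xs m hmin]
      have hm : m ∈ xs := PySem.List.min?_mem hmin
      have hlen : (xs.erase m).length < n := by
        rw [← hn]; have := List.length_erase_add_one hm; omega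
      simp only [maxMikanLoop]
      by_cases hle : w + m ≤ 5000
      · have hgt : ¬ (w + m > 5000) := by omega
        rw [if_neg hgt, if_pos hle]
        exact ih _ hlen (xs.erase m) rfl (w + m) (c + 1)
      · have hgt : w + m > 5000 := by omega
        rw [if_pos hgt, if_neg hle]

-- ===== VERDICT (by name: the statement is the Claim_ definition above) =====
theorem maxMikan_spec : Claim_equal_maxMikan := by
  intro mikan weight _
  unfold Spec_maxMikan maxMikan maxMikan_alt
  exact (altLoop_eq mikan.length mikan rfl weight 0).symm
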